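-- pv_equiv track=rewrite | github.com/brianhilsden/DSA | Number2.py | solution
-- ===== SOURCE A (Python) =====
-- def solution(A):
--     i = 0
--     length = len(A)
--
--     ways = 0
--     for i in range(1, length):
--         first_half = A[:i]
--         second_half = A[i:]
--         if first_half.count('x') == first_half.count('y') or second_half.count('x') == second_half.count('y'):
--             ways += 1
--
--     return ways
-- ===== SOURCE B (Python) =====
-- def solution(A):
--     tx = A.count('x')
--     ty = A.count('y')
--     px = py = 0
--     ways = 0
--     for ch in A[:-1]:
--         if ch == 'x':
--             px += 1
--         elif ch == 'y':
--             py += 1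
--         if px == py or tx - px == ty - py:
--             ways += 1
--     return ways
-- ===== Notes on version B (the rewrite author's own statement) =====
-- stated objective: faster
-- what changed: replaces the quadratic loop that slices and re-counts 'x'/'y' in both halves at every split point with a single pass maintaining running prefix counts (total counts computed once), O(1) per split
import Mathlib
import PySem

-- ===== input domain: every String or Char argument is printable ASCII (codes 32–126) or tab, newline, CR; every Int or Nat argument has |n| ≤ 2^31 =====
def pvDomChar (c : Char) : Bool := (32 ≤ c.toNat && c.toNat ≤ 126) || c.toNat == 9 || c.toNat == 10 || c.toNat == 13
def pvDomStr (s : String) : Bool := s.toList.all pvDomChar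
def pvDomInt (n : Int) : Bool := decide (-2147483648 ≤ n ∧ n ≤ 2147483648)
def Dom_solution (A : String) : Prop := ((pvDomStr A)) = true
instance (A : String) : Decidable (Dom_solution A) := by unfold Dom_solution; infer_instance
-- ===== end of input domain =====

-- B replaces A's slice-and-recount loop (it re-counts 'x'/'y' in both halves at every split)
-- with a single pass keeping running prefix counts, the total counts being computed once.

-- ===== PORT A =====
def solution (A : String) : Int :=
  let length : Int := PySem.Str.len A
  (PySem.List.pyRange 1 length 1).foldl
    (fun ways i =>
      let first_half := PySem.Str.slice A none (some i)
      let second_half := PySem.Str.slice A (some i) none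
      if PySem.Str.count first_half "x" = PySem.Str.count first_half "y" ∨
         PySem.Str.count second_half "x" = PySem.Str.count second_half "y"
      then ways + 1 else ways) 0

-- ===== PORT B =====
-- one step of B's loop body: the if/elif updating (px, py), then the split test on (px, py, ways)
def solStep (tx ty : Int) (s : Int × Int × Int) (ch : Char) : Int × Int × Int :=
  let px := if ch = 'x' then s.1 + 1 else s.1
  let py := if ch = 'x' then s.2.1 else if ch = 'y' then s.2.1 + 1 else s.2.1
  let ways := if px = py ∨ tx - px = ty - py then s.2.2 + 1 else s.2.2
  (px, py, ways)

def solution_alt (A : String) : Int :=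
  let tx : Int := PySem.Str.count A "x"
  let ty : Int := PySem.Str.count A "y"
  ((PySem.Str.slice A none (some (-1))).toList.foldl (solStep tx ty) (0, 0, 0)).2.2

-- ===== PRECONDITION & SPEC =====
def Spec_solution (A : String) (out : Int) : Prop := out = solution_alt A
instance (A : String) (out : Int) : Decidable (Spec_solution A out) := by unfold Spec_solution; infer_instance

-- ===== CLAIM (what is proved, stated in full; the proofs are below) =====
def Claim_equal_solution : Prop := ∀ (A : String), Dom_solution A → Spec_solution A (solution A)

-- ===== LEMMAS AND PROOFS =====
set_option maxHeartbeats 1000000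

-- the split predicate both programs count, stated on the character list
def splitOk (cs : List Char) (j : Nat) : Bool :=
  decide ((cs.take j).count 'x' = (cs.take j).count 'y' ∨
          (cs.drop j).count 'x' = (cs.drop j).count 'y')

-- PySem's substring count coincides with List.count for a one-character pattern
lemma count_go_singleton (c : Char) : ∀ (l : List Char) (fuel acc : Nat), l.length ≤ fuel →
    PySem.Chars.count.go [c] fuel l acc = acc + l.count c := by
  intro l
  induction l with
  | nil => intro fuel acc _; cases fuel <;> simp [PySem.Chars.count.go]
  | cons h t ih =>
    intro fuel acc hf
    cases fuel with
    | zero => simp at hf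
    | succ f =>
      by_cases hc : c = h
      · subst hc
        simp only [PySem.Chars.count.go, List.isPrefixOf, BEq.rfl, Bool.true_and,
          if_true, List.length_singleton, List.drop_one, List.tail_cons]
        rw [ih f (acc + 1) (by simpa using Nat.lt_succ_iff.mp (by simpa using hf))]
        simp; omega
      · have hb : (([c] : List Char).isPrefixOf (h :: t)) = false := by
          simp [List.isPrefixOf, hc]
        simp only [PySem.Chars.count.go, hb]
        rw [ih f acc (by simpa using Nat.lt_succ_iff.mp (by simpa using hf))]
        simp [List.count_cons]
        exact fun e => hc e.symm

lemma count_singleton (l : List Char) (c : Char) : PySem.Chars.count l [c] = l.count c := by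
  simp only [PySem.Chars.count, List.isEmpty_cons]
  exact (count_go_singleton c l l.length 0 le_rfl).trans (by omega)

-- A's fold counts, over the split positions 1..n-1, exactly splitOk
lemma solution_eq_countP (A : String) :
    solution A =
      ((List.range (A.toList.length - 1)).countP (fun k => splitOk A.toList (k + 1)) : Int) := by
  simp only [solution]
  rw [PySem.List.pyRange_one]
  rw [List.foldl_map, PySem.List.foldl_ite_add_one]
  have hlen : ((PySem.Str.len A) - 1).toNat = A.toList.length - 1 := by
    simp [pysem]
  rw [hlen, zero_add, Nat.cast_inj]
  refine List.countP_congr (fun k hk => ?_)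
  have h1 : (0:Int) ≤ 1 + (k:Int) := by omega
  have ht : ((1:Int) + k).toNat = k + 1 := by omega
  simp only [splitOk, decide_eq_true_eq]
  constructor <;> intro h <;>
  · simpa [pysem, count_singleton, PySem.List.slice_to _ h1, PySem.List.slice_from _ h1, ht] using h

-- the number of split points B's loop still adds, given running counts px, py
def W (tx ty px py : Int) : List Char → Int
  | [] => 0
  | c :: t =>
      let px' := px + (if c = 'x' then 1 else 0)
      let py' := py + (if c = 'y' then 1 else 0)
      (if px' = py' ∨ tx - px' = ty - py' then 1 else 0) + W tx ty px' py' t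

lemma foldl_solStep (tx ty : Int) : ∀ (l : List Char) (px py ways : Int),
    l.foldl (solStep tx ty) (px, py, ways) =
      (px + l.count 'x', py + l.count 'y', ways + W tx ty px py l) := by
  intro l
  induction l with
  | nil => intro px py ways; simp [W]
  | cons c t ih =>
    intro px py ways
    have hxy : ('x' : Char) ≠ 'y' := by decide
    simp only [List.foldl_cons, solStep]
    rw [ih]
    have hW : W tx ty px py (c :: t) =
        (if px + (if c = 'x' then (1:Int) else 0) = py + (if c = 'y' then (1:Int) else 0) ∨
            tx - (px + (if c = 'x' then (1:Int) else 0)) = ty - (py + (if c = 'y' then (1:Int) else 0))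
         then (1:Int) else 0) +
          W tx ty (px + (if c = 'x' then 1 else 0)) (py + (if c = 'y' then 1 else 0)) t := rfl
    rw [hW]
    by_cases hx : c = 'x'
    · subst hx
      simp only [if_pos rfl, if_neg hxy, add_zero]
      refine Prod.ext ?_ (Prod.ext ?_ ?_)
      · simp [List.count_cons]
        try push_cast
        try ring
      · simp [List.count_cons, hxy]
      · dsimp only
        split_ifs <;> omega
    · by_cases hy : c = 'y'
      · subst hy
        simp only [if_neg hx, if_pos rfl, add_zero]
        refine Prod.ext ?_ (Prod.ext ?_ ?_)
        · simp [List.count_cons, hx]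
        · simp [List.count_cons]
          try push_cast
          try ring
        · dsimp only
          split_ifs <;> omega
      · simp only [if_neg hx, if_neg hy, add_zero]
        refine Prod.ext ?_ (Prod.ext ?_ ?_)
        · simp [List.count_cons, hx]
        · simp [List.count_cons, hy]
        · dsimp only
          split_ifs <;> omega

lemma countP_range_succ (p : Nat → Bool) (n : Nat) :
    (List.range (n+1)).countP p = (if p 0 = true then 1 else 0) + (List.range n).countP (fun k => p (k+1)) := by
  rw [List.range_succ_eq_map, List.countP_cons, List.countP_map]
  have : (p ∘ Nat.succ) = fun k => p (k + 1) := rfl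
  rw [this]
  omega

lemma W_eq_countP (tx ty : Int) : ∀ (l : List Char) (px py : Int),
    W tx ty px py l =
      ((List.range l.length).countP (fun k =>
        decide (px + ((l.take (k+1)).count 'x' : Int) = py + ((l.take (k+1)).count 'y' : Int) ∨
                tx - (px + ((l.take (k+1)).count 'x' : Int)) =
                ty - (py + ((l.take (k+1)).count 'y' : Int)))) : Int) := by
  intro l
  induction l with
  | nil => intro px py; simp [W]
  | cons c t ih =>
    intro px py
    have hxy : ('x' : Char) ≠ 'y' := by decide
    have hW : W tx ty px py (c :: t) =
        (if px + (if c = 'x' then (1:Int) else 0) = py + (if c = 'y' then (1:Int) else 0) ∨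
            tx - (px + (if c = 'x' then (1:Int) else 0)) = ty - (py + (if c = 'y' then (1:Int) else 0))
         then (1:Int) else 0) +
          W tx ty (px + (if c = 'x' then 1 else 0)) (py + (if c = 'y' then 1 else 0)) t := rfl
    rw [hW, ih, List.length_cons, countP_range_succ]
    push_cast
    congr 1
    · -- the head split (j = 1)
      have h0 : (c :: t).take (0+1) = [c] := rfl
      rw [h0]
      by_cases hx : c = 'x' <;> by_cases hy : c = 'y'
      · exact absurd (hx.symm.trans hy) (by decide)
      · subst hx
        simp only [if_pos rfl, if_neg hxy, add_zero, decide_eq_true_eq,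
          show List.count 'x' (['x'] : List Char) = 1 from by decide,
          show List.count 'y' (['x'] : List Char) = 0 from by decide]
        split_ifs <;> (try push_cast at *) <;> omega
      · subst hy
        simp only [if_neg hx, if_pos rfl, add_zero, decide_eq_true_eq,
          show List.count 'x' (['y'] : List Char) = 0 from by decide,
          show List.count 'y' (['y'] : List Char) = 1 from by decide]
        split_ifs <;> (try push_cast at *) <;> omega
      · have h1 : List.count 'x' [c] = 0 := by simp [hx]
        have h2 : List.count 'y' [c] = 0 := by simp [hy]
        simp only [if_neg hx, if_neg hy, add_zero, decide_eq_true_eq, h1, h2]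
        split_ifs <;> (try push_cast at *) <;> omega
    · -- the shifted tail
      rw [Nat.cast_inj]
      refine List.countP_congr (fun k _ => ?_)
      simp only [decide_eq_true_eq]
      rw [show (c :: t).take (k+1+1) = c :: t.take (k+1) from rfl]
      by_cases hx : c = 'x' <;> by_cases hy : c = 'y'
      · exact absurd (hx.symm.trans hy) (by decide)
      · subst hx
        simp [List.count_cons, hxy]
        push_cast
        omega
      · subst hy
        simp [List.count_cons, hx]
        push_cast
        omega
      · simp [List.count_cons, hx, hy]
        try push_cast
        try omega

lemma take_dropLast_count (cs : List Char) (k : Nat) (hk : k + 1 ≤ cs.length - 1) :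
    (cs.dropLast.take (k+1)) = cs.take (k+1) := by
  rw [List.dropLast_eq_take, List.take_take]
  congr 1
  omega

lemma solution_alt_eq_countP (A : String) :
    solution_alt A =
      ((List.range (A.toList.length - 1)).countP (fun k => splitOk A.toList (k + 1)) : Int) := by
  simp only [solution_alt]
  rw [PySem.Str.toList_slice]
  have hdl : PySem.Chars.slice A.toList none (some (-1)) = A.toList.dropLast := by
    simp [pysem, PySem.List.slice_to_neg_one]
  rw [hdl, foldl_solStep, W_eq_countP]
  dsimp only
  simp only [List.length_dropLast, zero_add]
  rw [Nat.cast_inj]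
  refine List.countP_congr (fun k hk => ?_)
  have hk' : k < A.toList.length - 1 := List.mem_range.mp hk
  have htake := take_dropLast_count A.toList k (by omega)
  have hsplit : A.toList.take (k+1) ++ A.toList.drop (k+1) = A.toList := List.take_append_drop _ _
  have hx : A.toList.count 'x' = (A.toList.take (k+1)).count 'x' + (A.toList.drop (k+1)).count 'x' := by
    conv_lhs => rw [← hsplit]
    rw [List.count_append]
  have hy : A.toList.count 'y' = (A.toList.take (k+1)).count 'y' + (A.toList.drop (k+1)).count 'y' := by
    conv_lhs => rw [← hsplit]
    rw [List.count_append]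
  simp only [splitOk, decide_eq_true_eq, htake, zero_add]
  have hcx : (PySem.Str.count A "x" : Int) = ((A.toList.count 'x' : Nat) : Int) := by
    simp [pysem, count_singleton]
  have hcy : (PySem.Str.count A "y" : Int) = ((A.toList.count 'y' : Nat) : Int) := by
    simp [pysem, count_singleton]
  rw [hcx, hcy]
  constructor <;> intro h <;> (push_cast at h ⊢) <;> omega

-- ===== VERDICT (by name: the statement is the Claim_ definition above) =====
theorem solution_spec : Claim_equal_solution := by
  intro A _
  unfold Spec_solution
  rw [solution_eq_countP, solution_alt_eq_countP]
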